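-- pv_equiv track=rewrite | github.com/canairo/ict1011 | client/client.py | unwrap_segments
-- ===== SOURCE A (Python) =====
-- def unwrap_segments(points, mod_x=3000):
--     if not points:
--         return []
--
--     unwrapped = [list(points[0])]
--     x_offset = 0
--     y_offset = 0
--
--     threshold = mod_x / 2.0
--
--     for i in range(1, len(points)):
--         prev_x, prev_y = points[i-1]
--         curr_x, curr_y = points[i]
--
--         dx = curr_x - prev_x
--         dy = curr_y - prev_y
--
--         if dx < -threshold: x_offset += mod_x
--         elif dx > threshold: x_offset -= mod_x
--
--         if dy < -threshold: y_offset += mod_x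
--         elif dy > threshold: y_offset -= mod_x
--
--         unwrapped.append([curr_x + x_offset, curr_y + y_offset])
--
--     return unwrapped
-- ===== SOURCE B (Python) =====
-- def unwrap_segments(points, mod_x=3000):
--     # Divide and conquer: unwrap each half independently, then translate the
--     # whole right half by the offset read off the left half's last output
--     # plus the wrap correction at the split boundary.
--     def jump(d):
--         if 2 * d < -mod_x:
--             return mod_x
--         if 2 * d > mod_x:
--             return -mod_x
--         return 0
--
--     def solve(seg):
--         if len(seg) == 1:
--             return [list(seg[0])]
--         m = len(seg) // 2
--         left = solve(seg[:m])
--         right = solve(seg[m:])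
--         lx, ly = seg[m - 1]
--         rx, ry = seg[m]
--         sx = (left[-1][0] - lx) + jump(rx - lx)
--         sy = (left[-1][1] - ly) + jump(ry - ly)
--         return left + [[x + sx, y + sy] for x, y in right]
--
--     return solve(points) if points else []
-- ===== Notes on version B (the rewrite author's own statement) =====
-- stated objective: alternative
-- what changed: A's single left-to-right loop threading two running offsets is replaced by a divide-and-conquer: B recursively unwraps each half of the list independently and then translates the whole right half by the offset read off the left half's last output plus the wrap correction at the split boundary (correct because per-index offsets are prefix sums of per-step corrections, hence additive across the split).
import Mathlib
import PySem

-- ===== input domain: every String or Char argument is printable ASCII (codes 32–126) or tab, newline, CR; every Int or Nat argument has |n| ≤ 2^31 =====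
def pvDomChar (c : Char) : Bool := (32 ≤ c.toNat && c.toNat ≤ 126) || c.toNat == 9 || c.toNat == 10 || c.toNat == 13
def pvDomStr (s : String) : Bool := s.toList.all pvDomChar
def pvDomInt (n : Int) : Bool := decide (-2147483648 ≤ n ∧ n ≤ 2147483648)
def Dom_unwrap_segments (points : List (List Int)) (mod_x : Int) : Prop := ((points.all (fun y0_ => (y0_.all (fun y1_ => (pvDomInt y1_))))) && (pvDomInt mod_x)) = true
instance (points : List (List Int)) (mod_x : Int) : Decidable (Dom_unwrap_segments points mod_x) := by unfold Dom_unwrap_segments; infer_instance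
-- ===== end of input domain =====

-- B replaces A's single fused offset-accumulating loop by a divide-and-conquer: each half is
-- unwrapped independently and the right half is translated by the boundary offset; objective:
-- alternative algorithm of the same exact behaviour.


-- ===== PORT A =====
-- The float comparisons 'dx < -threshold' / 'dx > threshold' (threshold = mod_x/2.0) are ported
-- as '2*dx < -mod_x' / '2*dx > mod_x': exact on Dom (|2*dx|, |mod_x| ≤ 2^33 < 2^53, so the float
-- test decides exactly the rational inequality). Tuple unpacking 'prev_x, prev_y = points[i-1]'
-- is ported via pyGet? with a default that is never used under Pre_ (every point has length
-- exactly 2; on other shapes Python raises ValueError, except a lone first point, see Pre_).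
-- A's loop body, one iteration of 'for i in range(1, len(points))':
def pvABody (points : List (List Int)) (mod_x : Int)
    (st : List (List Int) × Int × Int) (i : Int) : List (List Int) × Int × Int :=
  let unwrapped := st.1
  let x_offset := st.2.1
  let y_offset := st.2.2
  let prev := (PySem.List.pyGet? points (i - 1)).getD []
  let curr := (PySem.List.pyGet? points i).getD []
  let prev_x := (PySem.List.pyGet? prev 0).getD 0
  let prev_y := (PySem.List.pyGet? prev 1).getD 0
  let curr_x := (PySem.List.pyGet? curr 0).getD 0
  let curr_y := (PySem.List.pyGet? curr 1).getD 0
  let dx := curr_x - prev_x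
  let dy := curr_y - prev_y
  let x_offset := if 2 * dx < -mod_x then x_offset + mod_x
    else if 2 * dx > mod_x then x_offset - mod_x else x_offset
  let y_offset := if 2 * dy < -mod_x then y_offset + mod_x
    else if 2 * dy > mod_x then y_offset - mod_x else y_offset
  (unwrapped ++ [[curr_x + x_offset, curr_y + y_offset]], x_offset, y_offset)

def unwrap_segments (points : List (List Int)) (mod_x : Int) : List (List Int) :=
  match points with
  | [] => []
  | p0 :: _ =>
    ((PySem.List.pyRange 1 (points.length : Int) 1).foldl
      (pvABody points mod_x) ([p0], 0, 0)).1

-- ===== PORT B =====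
-- Source B's jump helper (same exact integer form of the float threshold test, see the comment on A)
def pvJump (mod_x d : Int) : Int :=
  if 2 * d < -mod_x then mod_x else if 2 * d > mod_x then -mod_x else 0

-- c[0] / c[1] indexing / tuple unpacking; exact under Pre_ (length-2 points)
def pvFst (l : List Int) : Int := (PySem.List.pyGet? l 0).getD 0
def pvSnd (l : List Int) : Int := (PySem.List.pyGet? l 1).getD 0

-- Source B's solve: only ever invoked on nonempty segments (the top level filters []), so the
-- base case is written 'length ≤ 1' to make the Lean recursion total (for length 1 it is
-- exactly Python's 'len(seg) == 1' branch). seg[:k] / seg[k:] are PySem.List.slice,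
-- left[-1] is pyGet? (-1); the seg[k-1]/seg[k] tuple unpackings use pvFst/pvSnd.
def pvSolve (mod_x : Int) (seg : List (List Int)) : List (List Int) :=
  if h : seg.length ≤ 1 then [seg.headD []]
  else
    let k := seg.length / 2
    let left := pvSolve mod_x (PySem.List.slice seg none (some (k : Int)))
    let right := pvSolve mod_x (PySem.List.slice seg (some (k : Int)) none)
    let last := (PySem.List.pyGet? left (-1)).getD []
    let lp := (PySem.List.pyGet? seg ((k : Int) - 1)).getD []
    let rp := (PySem.List.pyGet? seg (k : Int)).getD []
    let sx := (pvFst last - pvFst lp) + pvJump mod_x (pvFst rp - pvFst lp)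
    let sy := (pvSnd last - pvSnd lp) + pvJump mod_x (pvSnd rp - pvSnd lp)
    left ++ right.map (fun p => [pvFst p + sx, pvSnd p + sy])
termination_by seg.length
decreasing_by
  · rw [PySem.List.slice_to_natCast]; simp; omega
  · rw [PySem.List.slice_from_natCast]; simp; omega

def unwrap_segments_alt (points : List (List Int)) (mod_x : Int) : List (List Int) :=
  if points = [] then [] else pvSolve mod_x points

-- ===== PRECONDITION & SPEC =====
-- Pre_ requires every point to be a 2-element list unless points is a singleton: on any excluded
-- input (≥ 2 points, some point not of length 2) A raises ValueError at the tuple unpacking,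
-- so nothing is claimed there (B raises there too).
def Pre_unwrap_segments (points : List (List Int)) (mod_x : Int) : Prop :=
  points.length ≤ 1 ∨ ∀ p ∈ points, p.length = 2
instance (points : List (List Int)) (mod_x : Int) : Decidable (Pre_unwrap_segments points mod_x) := by
  unfold Pre_unwrap_segments; infer_instance

def pvWitness_unwrap_segments : List (List Int) × Int := ([[0, 0], [2900, 10], [2850, -2900]], 3000)

def Spec_unwrap_segments (points : List (List Int)) (mod_x : Int) (out : List (List Int)) : Prop := out = unwrap_segments_alt points mod_x
instance (points : List (List Int)) (mod_x : Int) (out : List (List Int)) : Decidable (Spec_unwrap_segments points mod_x out) := by unfold Spec_unwrap_segments; infer_instance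

-- ===== CLAIM (what is proved, stated in full; the proofs are below) =====
def Claim_equal_unwrap_segments : Prop := ∀ (points : List (List Int)) (mod_x : Int), Dom_unwrap_segments points mod_x → Pre_unwrap_segments points mod_x → Spec_unwrap_segments points mod_x (unwrap_segments points mod_x)

-- ===== LEMMAS AND PROOFS =====

-- reference recursion both ports are proved equal to
def pvGo (mod_x px py xo yo : Int) : List (List Int) → List (List Int)
  | [] => []
  | c :: cs =>
    let cx := pvFst c
    let cy := pvSnd c
    let xo' := xo + pvJump mod_x (cx - px)
    let yo' := yo + pvJump mod_x (cy - py)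
    [cx + xo', cy + yo'] :: pvGo mod_x cx cy xo' yo' cs

theorem pvJump_add (xo m d : Int) :
    (if 2 * d < -m then xo + m else if 2 * d > m then xo - m else xo) = xo + pvJump m d := by
  unfold pvJump; split_ifs <;> ring

theorem pvFst_pair (x y : Int) : pvFst [x, y] = x := by
  simp [pvFst, PySem.List.pyGet?, PySem.List.pyIdx?]

theorem pvSnd_pair (x y : Int) : pvSnd [x, y] = y := by
  simp [pvSnd, PySem.List.pyGet?, PySem.List.pyIdx?]

theorem pvA_loop (points : List (List Int)) (mod_x : Int) :
    ∀ (fuel k : Nat) (u : List (List Int)) (xo yo : Int),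
      fuel = points.length - k → 1 ≤ k → k ≤ points.length →
      ((PySem.List.pyRange (k : Int) (points.length : Int) 1).foldl (pvABody points mod_x) (u, xo, yo)).1
        = u ++ pvGo mod_x (pvFst (points.getD (k-1) [])) (pvSnd (points.getD (k-1) []))
            xo yo (points.drop k) := by
  intro fuel
  induction fuel with
  | zero =>
    intro k u xo yo hf h1 h2
    have hk : k = points.length := by omega
    rw [PySem.List.pyRange_one_eq_nil (by exact_mod_cast Int.ofNat_le.mpr (le_of_eq hk.symm))]
    simp [hk, pvGo, List.drop_of_length_le]
  | succ m ih =>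
    intro k u xo yo hf h1 h2
    have hk : k < points.length := by omega
    rw [PySem.List.pyRange_one_cons (by exact_mod_cast hk)]
    rw [List.foldl_cons]
    have hprevi : ((k : Int) - 1) = ((k - 1 : Nat) : Int) := by omega
    have hbody : pvABody points mod_x (u, xo, yo) (k : Int)
        = (u ++ [[pvFst points[k] +
              (xo + pvJump mod_x (pvFst points[k] - pvFst (points.getD (k-1) []))),
            pvSnd points[k] +
              (yo + pvJump mod_x (pvSnd points[k] - pvSnd (points.getD (k-1) [])))]],
           xo + pvJump mod_x (pvFst points[k] - pvFst (points.getD (k-1) [])),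
           yo + pvJump mod_x (pvSnd points[k] - pvSnd (points.getD (k-1) [])))  := by
      have hgd : points[k-1]?.getD [] = points.getD (k-1) [] := by
        simp [List.getD]
      simp only [pvABody, hprevi, PySem.List.pyGet?_natCast,
        List.getElem?_eq_getElem hk, Option.getD_some, pvFst, pvSnd, hgd]
      rw [pvJump_add, pvJump_add]
    rw [hbody]
    have hcast : ((k : Int) + 1) = ((k + 1 : Nat) : Int) := by omega
    rw [hcast, ih (k+1) _ _ _ (by omega) (by omega) (by omega)]
    have hdrop : points.drop k = points[k] :: points.drop (k+1) := List.drop_eq_getElem_cons hk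
    have hgd2 : points.getD (k+1-1) [] = points[k] := by
      simp [List.getD, List.getElem?_eq_getElem hk]
    rw [hgd2, hdrop]
    simp [pvGo]

theorem pvA_eq_go (p0 : List Int) (rest : List (List Int)) (mod_x : Int) :
    unwrap_segments (p0 :: rest) mod_x
      = p0 :: pvGo mod_x (pvFst p0) (pvSnd p0) 0 0 rest := by
  show ((PySem.List.pyRange ((1:Nat) : Int) ((p0 :: rest).length : Int) 1).foldl
      (pvABody (p0 :: rest) mod_x) ([p0], 0, 0)).1 = _
  rw [pvA_loop (p0 :: rest) mod_x ((p0 :: rest).length - 1) 1 [p0] 0 0 rfl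
      (by omega) (by simp)]
  simp [List.getD]

-- final state (prev_x, prev_y, x_offset, y_offset) after running the unwrap recursion over a list
def pvState (m : Int) : Int → Int → Int → Int → List (List Int) → Int × Int × Int × Int
  | px, py, xo, yo, [] => (px, py, xo, yo)
  | px, py, xo, yo, c :: cs =>
      pvState m (pvFst c) (pvSnd c) (xo + pvJump m (pvFst c - px)) (yo + pvJump m (pvSnd c - py)) cs

theorem pvGo_append (m : Int) : ∀ (l1 l2 : List (List Int)) (px py xo yo : Int),
    pvGo m px py xo yo (l1 ++ l2)
      = pvGo m px py xo yo l1 ++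
        pvGo m (pvState m px py xo yo l1).1 (pvState m px py xo yo l1).2.1
          (pvState m px py xo yo l1).2.2.1 (pvState m px py xo yo l1).2.2.2 l2 := by
  intro l1
  induction l1 with
  | nil => intro l2 px py xo yo; simp [pvState, pvGo]
  | cons c cs ih =>
    intro l2 px py xo yo
    simp only [List.cons_append, pvGo, pvState]
    rw [ih]

theorem pvState_fst (m : Int) : ∀ (l : List (List Int)) (p : List Int) (xo yo : Int),
    (pvState m (pvFst p) (pvSnd p) xo yo l).1 = pvFst ((p :: l).getLast (by simp))
    ∧ (pvState m (pvFst p) (pvSnd p) xo yo l).2.1 = pvSnd ((p :: l).getLast (by simp)) := by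
  intro l
  induction l with
  | nil => intro p xo yo; simp [pvState]
  | cons c cs ih =>
    intro p xo yo
    simp only [pvState]
    have hl : (p :: c :: cs).getLast (by simp) = (c :: cs).getLast (by simp) :=
      List.getLast_cons (by simp)
    rw [hl]
    exact ih c _ _

theorem pvGo_getLast? (m : Int) : ∀ (l : List (List Int)) (px py xo yo : Int), l ≠ [] →
    (pvGo m px py xo yo l).getLast?
      = some [(pvState m px py xo yo l).1 + (pvState m px py xo yo l).2.2.1,
              (pvState m px py xo yo l).2.1 + (pvState m px py xo yo l).2.2.2] := by
  intro l
  induction l with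
  | nil => intro _ _ _ _ h; exact absurd rfl h
  | cons c cs ih =>
    intro px py xo yo _
    cases cs with
    | nil => simp [pvGo, pvState]
    | cons d ds =>
      have h := ih (pvFst c) (pvSnd c) (xo + pvJump m (pvFst c - px))
        (yo + pvJump m (pvSnd c - py)) (by simp)
      simp only [pvGo, pvState] at h ⊢
      rw [List.getLast?_cons_cons]
      exact h

-- getLast? of a solved segment: last raw point plus the final offsets
theorem pvSolveLast (m t0x t0y : Int) (t0 : List Int) (ht : t0 = [t0x, t0y])
    (l : List (List Int)) :
    (t0 :: pvGo m t0x t0y 0 0 l).getLast?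
      = some [(pvState m t0x t0y 0 0 l).1 + (pvState m t0x t0y 0 0 l).2.2.1,
              (pvState m t0x t0y 0 0 l).2.1 + (pvState m t0x t0y 0 0 l).2.2.2] := by
  cases l with
  | nil => simp [pvGo, pvState, ht]
  | cons u us =>
    cases hgo : pvGo m t0x t0y 0 0 (u :: us) with
    | nil => simp [pvGo] at hgo
    | cons g gs =>
      calc (t0 :: g :: gs).getLast? = (g :: gs).getLast? := List.getLast?_cons_cons
        _ = _ := by rw [← hgo]; exact pvGo_getLast? m (u :: us) t0x t0y 0 0 (by simp)

theorem pvGo_shift (m sx sy : Int) : ∀ (l : List (List Int)) (px py xo yo : Int),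
    (pvGo m px py xo yo l).map (fun p => [pvFst p + sx, pvSnd p + sy])
      = pvGo m px py (xo + sx) (yo + sy) l := by
  intro l
  induction l with
  | nil => intro px py xo yo; simp [pvGo]
  | cons c cs ih =>
    intro px py xo yo
    simp only [pvGo, List.map_cons]
    rw [ih, pvFst_pair, pvSnd_pair]
    rw [show xo + pvJump m (pvFst c - px) + sx = xo + sx + pvJump m (pvFst c - px) from by ring]
    rw [show yo + pvJump m (pvSnd c - py) + sy = yo + sy + pvJump m (pvSnd c - py) from by ring]
    rw [show pvFst c + (xo + pvJump m (pvFst c - px)) + sx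
        = pvFst c + (xo + sx + pvJump m (pvFst c - px)) from by ring]
    rw [show pvSnd c + (yo + pvJump m (pvSnd c - py)) + sy
        = pvSnd c + (yo + sy + pvJump m (pvSnd c - py)) from by ring]

theorem pvPair_cong (a a' b b' : Int) (h1 : a = a') (h2 : b = b') : [a, b] = [a', b'] := by
  rw [h1, h2]

theorem pvGo_cong (m px py xo xo' yo yo' : Int) (l : List (List Int))
    (hx : xo = xo') (hy : yo = yo') : pvGo m px py xo yo l = pvGo m px py xo' yo' l := by
  rw [hx, hy]

theorem pvSolve_eq (m : Int) : ∀ (n : Nat) (seg : List (List Int)), seg.length ≤ n →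
    seg ≠ [] → (∀ p ∈ seg, p.length = 2) →
    pvSolve m seg
      = seg.headD [] :: pvGo m (pvFst (seg.headD [])) (pvSnd (seg.headD [])) 0 0 seg.tail := by
  intro n
  induction n with
  | zero =>
    intro seg hlen hne _
    cases seg with
    | nil => exact absurd rfl hne
    | cons a l => simp at hlen
  | succ n ih =>
    intro seg hlen hne h2
    rw [pvSolve]
    by_cases hb : seg.length ≤ 1
    · rw [dif_pos hb]
      cases seg with
      | nil => exact absurd rfl hne
      | cons t0 tl =>
        cases tl with
        | nil => simp [pvGo]
        | cons x xs => simp at hb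
    · rw [dif_neg hb]
      cases seg with
      | nil => exact absurd rfl hne
      | cons t0 tl =>
        have hb2 : 2 ≤ tl.length + 1 := by
          simp only [List.length_cons] at hb; omega
        obtain ⟨j, hj⟩ : ∃ j, (t0 :: tl).length / 2 = j + 1 := by
          refine ⟨(t0 :: tl).length / 2 - 1, ?_⟩
          simp only [List.length_cons]
          omega
        have hjl : j < tl.length := by
          simp only [List.length_cons] at hj
          omega
        simp only []
        rw [hj, PySem.List.slice_to_natCast, PySem.List.slice_from_natCast,
          List.take_succ_cons, List.drop_succ_cons]
        have hlen2 : tl.length + 1 ≤ n + 1 := by simpa using hlen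
        -- left half
        have iT := ih (t0 :: tl.take j)
          (by simp only [List.length_cons, List.length_take]; omega) (by simp)
          (fun p hp => h2 p (by
            rcases List.mem_cons.mp hp with h | h
            · simp [h]
            · exact List.mem_cons_of_mem _ (List.take_subset j tl h)))
        -- right half
        have hdrop : tl.drop j = tl[j] :: tl.drop (j+1) := List.drop_eq_getElem_cons hjl
        have iD := ih (tl.drop j) (by simp only [List.length_drop]; omega)
          (by simp only [ne_eq, List.drop_eq_nil_iff]; omega)
          (fun p hp => h2 p (List.mem_cons_of_mem _ (List.drop_subset j tl hp)))
        rw [iT, iD]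
        simp only [List.headD_cons, List.tail_cons]
        -- the lone / last raw point of the left half
        obtain ⟨a, b, hab⟩ : ∃ a b, t0 = [a, b] := by
          have := h2 t0 (by simp)
          match t0, this with
          | [a, b], _ => exact ⟨a, b, rfl⟩
        have ht0 : t0 = [pvFst t0, pvSnd t0] := by
          rw [hab, pvFst_pair, pvSnd_pair]
        -- left[-1]
        rw [PySem.List.pyGet?_neg_one, pvSolveLast m (pvFst t0) (pvSnd t0) t0 ht0 (tl.take j)]
        -- seg[k-1] and seg[k]
        have hidx1 : ((((j : Nat) + 1 : Nat) : Int) - 1) = ((j : Nat) : Int) := by push_cast; ring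
        have hlp : (PySem.List.pyGet? (t0 :: tl) ((((j : Nat) + 1 : Nat) : Int) - 1)).getD []
            = (t0 :: tl)[j]'(by simpa using Nat.lt_succ_of_lt hjl) := by
          rw [hidx1, PySem.List.pyGet?_natCast,
            List.getElem?_eq_getElem (by simpa using Nat.lt_succ_of_lt hjl)]
          rfl
        have hrp : (PySem.List.pyGet? (t0 :: tl) (((j : Nat) + 1 : Nat) : Int)).getD []
            = tl[j] := by
          rw [PySem.List.pyGet?_natCast, List.getElem?_eq_getElem (by simpa using hjl)]
          simp
        rw [hlp, hrp]
        -- the final state of the left half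
        have hst := pvState_fst m (tl.take j) t0 0 0
        have hglast : (t0 :: tl.take j).getLast (by simp)
            = (t0 :: tl)[j]'(by simpa using Nat.lt_succ_of_lt hjl) := by
          have hteq : t0 :: tl.take j = (t0 :: tl).take (j + 1) := by
            rw [List.take_succ_cons]
          rw [List.getLast_eq_getElem]
          simp only [List.length_cons, List.length_take, Nat.min_eq_left (le_of_lt hjl),
            Nat.add_sub_cancel]
          rw [List.getElem_of_eq hteq, List.getElem_take]
        rw [hglast] at hst
        rw [Option.getD_some, pvFst_pair, pvSnd_pair, ← hst.1, ← hst.2]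
        -- assemble
        rw [hdrop]
        simp only [List.headD_cons, List.tail_cons, List.map_cons]
        rw [pvGo_shift]
        conv_rhs => rw [show tl = tl.take j ++ tl.drop j from (List.take_append_drop j tl).symm]
        rw [pvGo_append, hdrop]
        simp only [pvGo, List.cons_append]
        congr 2
        congr 1
        · exact pvPair_cong _ _ _ _ (by ring) (by ring)
        · exact pvGo_cong _ _ _ _ _ _ _ _ (by ring) (by ring)

theorem pvB_eq (p0 : List Int) (rest : List (List Int)) (mod_x : Int)
    (h2 : ∀ p ∈ (p0 :: rest), p.length = 2) :
    unwrap_segments_alt (p0 :: rest) mod_x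
      = p0 :: pvGo mod_x (pvFst p0) (pvSnd p0) 0 0 rest := by
  unfold unwrap_segments_alt
  rw [if_neg (by simp)]
  exact pvSolve_eq mod_x (p0 :: rest).length (p0 :: rest) le_rfl (by simp) h2

-- ===== VERDICT (by name: the statement is the Claim_ definition above) =====
theorem unwrap_segments_spec : Claim_equal_unwrap_segments := by
  intro points mod_x _hdom hpre
  unfold Spec_unwrap_segments
  cases points with
  | nil => rfl
  | cons p0 rest =>
    cases rest with
    | nil =>
      show _ = unwrap_segments_alt [p0] mod_x
      unfold unwrap_segments_alt
      rw [if_neg (by simp), pvSolve]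
      simp [unwrap_segments, PySem.List.pyRange_one_eq_nil]
    | cons p1 rest' =>
      have h2 : ∀ p ∈ (p0 :: p1 :: rest'), p.length = 2 := by
        cases hpre with
        | inl h => simp at h
        | inr h => exact h
      rw [pvA_eq_go, pvB_eq _ _ _ h2]
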